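-- pv_equiv track=rewrite | github.com/Matthiosso/python-optimization-algorithm | solver_packets_agents.py | get_max_packets_recursively
-- ===== SOURCE A (Python) =====
-- def get_max_packets_recursively(packets : list, agents : int, max_packet : int) -> int:
--     '''
--     Recursive function to get the max packets each agent can carry.
--     '''
--     max_packets = 0
--     # log.debug(f'Agents : {agents} -- Max Packet : {max_packet}')
--     for p in packets:
--         divided_packets = p // max_packet
--         # log.debug(f'Packet : {p} -- Divide packet : {divided_packets}')
--         if (divided_packets > 0):
--             max_packets += divided_packets
--     # log.debug(f'Max packet : {max_packets}')
--     if max_packets >= agents: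
--         return max_packet
--     return get_max_packets_recursively(packets, agents, max_packet-1)
-- ===== SOURCE B (Python) =====
-- def get_max_packets_recursively(packets, agents, max_packet):
--     '''Binary search for the largest divisor v in [1, max_packet] whose total
--     of whole divided packets reaches agents; the total sum(max(p//v,0)) is nonincreasing in v.'''
--     def total(v):
--         t = 0
--         for p in packets:
--             d = p // v
--             if d > 0:
--                 t += d
--         return t
--     lo, hi = 1, max_packet
--     while lo < hi:
--         mid = (lo + hi + 1) // 2
--         if total(mid) >= agents:
--             lo = mid
--         else:
--             hi = mid - 1
--     return lo
-- ===== Notes on version B (the rewrite author's own statement) =====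
-- stated objective: alternative
-- what changed: Replaces A's linear downward scan from max_packet (recomputing the packet total at every divisor) by a binary search for the largest divisor v in [1,max_packet] with sum(max(p//v,0)) >= agents, using that this total is nonincreasing in v; A's scan is adaptive and often stops immediately, so B trades A's O(n*(max_packet-answer)) worst case for a uniform O(n*log max_packet).
-- outside the precondition, e.g. on get_max_packets_recursively([-5], 1, -1): A returns -1, B returns 1
import Mathlib
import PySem

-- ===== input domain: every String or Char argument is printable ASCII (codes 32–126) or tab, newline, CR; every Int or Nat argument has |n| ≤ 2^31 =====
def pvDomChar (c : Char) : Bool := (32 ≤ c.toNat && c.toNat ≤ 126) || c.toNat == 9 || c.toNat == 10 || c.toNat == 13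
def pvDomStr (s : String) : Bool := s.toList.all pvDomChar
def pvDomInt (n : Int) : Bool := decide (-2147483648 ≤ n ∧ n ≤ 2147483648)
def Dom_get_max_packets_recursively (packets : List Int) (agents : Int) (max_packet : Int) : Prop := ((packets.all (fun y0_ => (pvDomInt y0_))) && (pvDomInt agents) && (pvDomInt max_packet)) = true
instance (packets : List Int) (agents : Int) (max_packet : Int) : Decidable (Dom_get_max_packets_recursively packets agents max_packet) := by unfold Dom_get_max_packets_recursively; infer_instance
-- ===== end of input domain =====

-- B replaces A's linear downward scan over divisors by a binary search on the
-- monotone packet total (a different algorithm, not measured faster); return value only.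

-- ===== PORT A =====
-- A's loop body: max_packets accumulated over packets with p // max_packet
def pvSumDivA (packets : List Int) (v : Int) : Int :=
  packets.foldl (fun acc p =>
    let d := PySem.Int.floordiv p v
    if d > 0 then acc + d else acc) 0

-- Python recurses downward; at max_packet = 0 it raises ZeroDivisionError and below 0 it
-- (on the admitted inputs) never returns — both are outside Pre_, marked by the 0 branch.
def get_max_packets_recursively (packets : List Int) (agents : Int) (max_packet : Int) : Int :=
  if h : max_packet ≤ 0 then 0
  else
    if pvSumDivA packets max_packet ≥ agents then max_packet
    else get_max_packets_recursively packets agents (max_packet - 1)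
termination_by max_packet.toNat
decreasing_by omega

-- ===== PORT B =====
-- B's helper total(v)
def pvSumDivB (packets : List Int) (v : Int) : Int :=
  packets.foldl (fun t p =>
    let d := PySem.Int.floordiv p v
    if d > 0 then t + d else t) 0

-- B's while-loop: binary search for the largest v with total(v) >= agents
def pvBSearch (packets : List Int) (agents : Int) (lo hi : Int) : Int :=
  if h : lo < hi then
    let mid := PySem.Int.floordiv (lo + hi + 1) 2
    if pvSumDivB packets mid ≥ agents then pvBSearch packets agents mid hi
    else pvBSearch packets agents lo (mid - 1)
  else lo
termination_by (hi - lo).toNat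
decreasing_by
  · have := PySem.Int.floordiv_eq_ediv_of_pos (a := lo + hi + 1) (b := 2) (by omega)
    simp only [this]; omega
  · have := PySem.Int.floordiv_eq_ediv_of_pos (a := lo + hi + 1) (b := 2) (by omega)
    simp only [this]; omega

def get_max_packets_recursively_alt (packets : List Int) (agents : Int) (max_packet : Int) : Int :=
  pvBSearch packets agents 1 max_packet

-- ===== PRECONDITION & SPEC =====
-- Pre_ restricts to the natural domain max_packet ≥ 1 (for max_packet ≤ 0 Python divides by
-- zero or recurses through negative divisors, though on some such inputs it happens to return,
-- e.g. ([-5], 1, -1)), and requires that divisor 1 already yields at least `agents` packets —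
-- otherwise A recurses past 0 and raises ZeroDivisionError.
def Pre_get_max_packets_recursively (packets : List Int) (agents : Int) (max_packet : Int) : Prop :=
  1 ≤ max_packet ∧ agents ≤ (packets.map (fun p => if 0 < p then p else 0)).sum

instance (packets : List Int) (agents : Int) (max_packet : Int) : Decidable (Pre_get_max_packets_recursively packets agents max_packet) := by unfold Pre_get_max_packets_recursively; infer_instance

def pvWitness_get_max_packets_recursively : List Int × Int × Int := ([7, 3, -2], 4, 5)

def Spec_get_max_packets_recursively (packets : List Int) (agents : Int) (max_packet : Int) (out : Int) : Prop := out = get_max_packets_recursively_alt packets agents max_packet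
instance (packets : List Int) (agents : Int) (max_packet : Int) (out : Int) : Decidable (Spec_get_max_packets_recursively packets agents max_packet out) := by unfold Spec_get_max_packets_recursively; infer_instance

-- ===== CLAIM (what is proved, stated in full; the proofs are below) =====
def Claim_equal_get_max_packets_recursively : Prop := ∀ (packets : List Int) (agents : Int) (max_packet : Int), Dom_get_max_packets_recursively packets agents max_packet → Pre_get_max_packets_recursively packets agents max_packet → Spec_get_max_packets_recursively packets agents max_packet (get_max_packets_recursively packets agents max_packet)

-- ===== LEMMAS AND PROOFS =====

-- the two totals are the same fold
lemma sumDivB_eq_A (packets : List Int) (v : Int) : pvSumDivB packets v = pvSumDivA packets v := rfl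

-- fold as a map-sum
lemma sumDivA_eq_sum (packets : List Int) (v : Int) :
    pvSumDivA packets v
      = (packets.map (fun p => if 0 < PySem.Int.floordiv p v then PySem.Int.floordiv p v else 0)).sum := by
  unfold pvSumDivA
  induction packets using List.reverseRecOn with
  | nil => simp
  | append_singleton xs x ih =>
      simp only [List.foldl_append, List.foldl_cons, List.foldl_nil, List.map_append,
        List.sum_append, List.map_cons, List.map_nil, List.sum_cons, List.sum_nil, ih]
      split_ifs <;> omega

-- per-element monotonicity of max(p // v, 0) in the divisor
lemma term_mono (p u v : Int) (hu : 0 < u) (huv : u ≤ v) :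
    (if 0 < PySem.Int.floordiv p v then PySem.Int.floordiv p v else 0)
      ≤ (if 0 < PySem.Int.floordiv p u then PySem.Int.floordiv p u else 0) := by
  have hv : (0:Int) < v := lt_of_lt_of_le hu huv
  by_cases hq : 0 < PySem.Int.floordiv p v
  · set q := PySem.Int.floordiv p v with hqd
    have hqv : q * v ≤ p := by
      have := (PySem.Int.le_floordiv_iff_mul_le (q := q) (a := p) (b := v) hv).mp le_rfl
      exact this
    have hqu : q ≤ PySem.Int.floordiv p u := by
      rw [PySem.Int.le_floordiv_iff_mul_le hu]
      calc q * u ≤ q * v := by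
            exact mul_le_mul_of_nonneg_left huv (le_of_lt hq)
        _ ≤ p := hqv
    have : 0 < PySem.Int.floordiv p u := lt_of_lt_of_le hq hqu
    simp [hq, this, hqu]
  · simp only [hq, if_false]
    split_ifs with h <;> omega

lemma sumDiv_mono (packets : List Int) (u v : Int) (hu : 0 < u) (huv : u ≤ v) :
    pvSumDivA packets v ≤ pvSumDivA packets u := by
  rw [sumDivA_eq_sum, sumDivA_eq_sum]
  induction packets with
  | nil => simp
  | cons p ps ih =>
      simp only [List.map_cons, List.sum_cons]
      exact add_le_add (term_mono p u v hu huv) ih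

lemma sumDivA_one (packets : List Int) :
    pvSumDivA packets 1 = (packets.map (fun p => if 0 < p then p else 0)).sum := by
  rw [sumDivA_eq_sum]
  congr 1
  apply List.map_congr_left
  intro p _
  have : PySem.Int.floordiv p 1 = p := by
    rw [PySem.Int.floordiv_eq_ediv_of_pos (by omega)]; omega
  rw [this]

-- characterization: r is the answer for upper bound M
def IsAns (packets : List Int) (agents M r : Int) : Prop :=
  1 ≤ r ∧ r ≤ M ∧ agents ≤ pvSumDivA packets r ∧
    ∀ w, r < w → w ≤ M → ¬ agents ≤ pvSumDivA packets w

lemma isAns_unique {packets : List Int} {agents M r₁ r₂ : Int}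
    (h₁ : IsAns packets agents M r₁) (h₂ : IsAns packets agents M r₂) : r₁ = r₂ := by
  obtain ⟨a1, b1, c1, d1⟩ := h₁
  obtain ⟨a2, b2, c2, d2⟩ := h₂
  rcases lt_trichotomy r₁ r₂ with h | h | h
  · exact absurd c2 (d1 r₂ h b2)
  · exact h
  · exact absurd c1 (d2 r₁ h b1)

lemma A_isAns (packets : List Int) (agents : Int) :
    ∀ n : ℕ, ∀ v : Int, v.toNat = n → 1 ≤ v →
      agents ≤ pvSumDivA packets 1 →
      IsAns packets agents v (get_max_packets_recursively packets agents v) := by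
  intro n
  induction n with
  | zero => intro v hv h1 _; omega
  | succ n ih =>
      intro v hv h1 hG1
      rw [get_max_packets_recursively]
      rw [dif_neg (by omega)]
      by_cases hG : pvSumDivA packets v ≥ agents
      · rw [if_pos hG]
        exact ⟨h1, le_rfl, hG, fun w hw hw' _ => by omega⟩
      · rw [if_neg hG]
        have hv1 : v ≠ 1 := by
          rintro rfl; exact hG hG1
        have h2 : 1 ≤ v - 1 := by omega
        obtain ⟨a, b, c, d⟩ := ih (v - 1) (by omega) h2 hG1
        refine ⟨a, by omega, c, ?_⟩
        intro w hw hw' hGw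
        rcases lt_or_ge w v with h | h
        · exact d w hw (by omega) hGw
        · have : w = v := by omega
          subst this
          exact hG hGw

lemma B_isAns (packets : List Int) (agents M : Int) :
    ∀ n : ℕ, ∀ lo hi : Int, (hi - lo).toNat = n →
      1 ≤ lo → lo ≤ hi → hi ≤ M →
      agents ≤ pvSumDivA packets lo →
      (∀ w, hi < w → w ≤ M → ¬ agents ≤ pvSumDivA packets w) →
      IsAns packets agents M (pvBSearch packets agents lo hi) := by
  intro n
  induction n using Nat.strong_induction_on with
  | _ n ih =>
      intro lo hi hn h1 hlh hhM hGlo hup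
      rw [pvBSearch]
      by_cases hlt : lo < hi
      · rw [dif_pos hlt]
        have hmid2 : PySem.Int.floordiv (lo + hi + 1) 2 = (lo + hi + 1) / 2 :=
          PySem.Int.floordiv_eq_ediv_of_pos (by omega)
        set mid := PySem.Int.floordiv (lo + hi + 1) 2 with hmid
        have hmlo : lo < mid := by omega
        have hmhi : mid ≤ hi := by omega
        by_cases hG : pvSumDivB packets mid ≥ agents
        · rw [if_pos hG]
          exact ih (hi - mid).toNat (by omega) mid hi rfl (by omega) hmhi hhM
            (by rw [← sumDivB_eq_A]; exact hG) hup
        · rw [if_neg hG]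
          refine ih (mid - 1 - lo).toNat (by omega) lo (mid - 1) rfl h1 (by omega) (by omega)
            hGlo ?_
          intro w hw hwM hGw
          rcases le_or_gt w hi with h | h
          · have hmw : mid ≤ w := by omega
            have : pvSumDivA packets w ≤ pvSumDivA packets mid :=
              sumDiv_mono packets mid w (by omega) hmw
            rw [sumDivB_eq_A] at hG
            exact hG (le_trans hGw this)
          · exact hup w h hwM hGw
      · rw [dif_neg hlt]
        have : lo = hi := by omega
        subst this
        exact ⟨h1, hhM, hGlo, fun w hw hwM => hup w hw hwM⟩

-- ===== VERDICT (by name: the statement is the Claim_ definition above) =====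
theorem get_max_packets_recursively_spec : Claim_equal_get_max_packets_recursively := by
  intro packets agents max_packet _ hpre
  obtain ⟨hM, hS⟩ := hpre
  have hG1 : agents ≤ pvSumDivA packets 1 := by rw [sumDivA_one]; exact hS
  have hA := A_isAns packets agents max_packet.toNat max_packet rfl hM hG1
  have hB := B_isAns packets agents max_packet (max_packet - 1).toNat 1 max_packet rfl
    le_rfl hM le_rfl hG1 (fun w hw hwM => by omega)
  unfold Spec_get_max_packets_recursively get_max_packets_recursively_alt
  exact isAns_unique hA hB
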